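-- pv_equiv track=rewrite | github.com/Pradeep1321/LeetCode | Imp-Cells-Odd-Values-Matrix.py | oddCells1
-- ===== SOURCE A (Python) =====
-- def oddCells1(n, m, indices):
--     row_m = []
--     col_m = []
--     total = 0
--     for i in indices:
--         if i[0] in row_m:
--             row_m.remove(i[0])
--             total += len(col_m)
--             total -= (m - len(col_m))
--         elif i[0] not in row_m:
--             row_m.append(i[0])
--             total += (m - 2 * len(col_m))
--         if i[1] in col_m:
--             col_m.remove(i[1])
--             total += len(row_m)
--             total -= (n - len(row_m))
--         elif i[1] not in col_m:
--             col_m.append(i[1])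
--             total += (n - 2 * len(row_m))
--     return total
-- ===== SOURCE B (Python) =====
-- def oddCells1(n, m, indices):
--     rows, cols = set(), set()
--     for i in indices:
--         rows ^= {i[0]}
--         cols ^= {i[1]}
--     R, C = len(rows), len(cols)
--     return R * (m - C) + C * (n - R)
-- ===== Notes on version B (the rewrite author's own statement) =====
-- stated objective: alternative
-- what changed: B replaces A's incremental running-total bookkeeping over membership-toggle lists with parity sets maintained by symmetric difference and one closed formula R*(m-C)+C*(n-R) applied at the end.
import Mathlib
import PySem

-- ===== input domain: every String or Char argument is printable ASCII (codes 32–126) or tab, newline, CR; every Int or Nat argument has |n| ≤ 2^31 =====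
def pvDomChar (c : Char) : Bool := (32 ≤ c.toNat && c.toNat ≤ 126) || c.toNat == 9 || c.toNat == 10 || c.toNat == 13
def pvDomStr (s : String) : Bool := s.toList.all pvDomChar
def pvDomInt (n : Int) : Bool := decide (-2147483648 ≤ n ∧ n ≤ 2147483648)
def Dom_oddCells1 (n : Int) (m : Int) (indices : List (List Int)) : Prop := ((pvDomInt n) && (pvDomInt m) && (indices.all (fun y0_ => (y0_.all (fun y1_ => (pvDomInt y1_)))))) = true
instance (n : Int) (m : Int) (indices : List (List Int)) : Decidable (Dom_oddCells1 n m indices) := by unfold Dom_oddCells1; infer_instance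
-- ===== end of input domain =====

-- B tracks row/column parity sets (symmetric-difference toggles) and applies the closed
-- formula R*(m-C)+C*(n-R) once at the end, instead of A's incremental running total.

-- ===== PORT A =====
-- one loop iteration of A: state (row_m, col_m, total)
def oddCells1Step (n : Int) (m : Int) (st : List Int × List Int × Int) (i : List Int) :
    List Int × List Int × Int :=
  let i0 := PySem.List.pyGetD i 0 0      -- i[0]; in range under Pre_
  let i1 := PySem.List.pyGetD i 1 0      -- i[1]; in range under Pre_
  let rt : List Int × Int :=
    if st.1.contains i0 then
      ((PySem.List.remove? st.1 i0).getD st.1,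
        st.2.2 + (st.2.1.length : Int) - (m - (st.2.1.length : Int)))
    else
      (st.1 ++ [i0], st.2.2 + (m - 2 * (st.2.1.length : Int)))
  let ct : List Int × Int :=
    if st.2.1.contains i1 then
      ((PySem.List.remove? st.2.1 i1).getD st.2.1,
        rt.2 + (rt.1.length : Int) - (n - (rt.1.length : Int)))
    else
      (st.2.1 ++ [i1], rt.2 + (n - 2 * (rt.1.length : Int)))
  (rt.1, ct.1, ct.2)

def oddCells1 (n : Int) (m : Int) (indices : List (List Int)) : Int :=
  (indices.foldl (oddCells1Step n m) ([], [], 0)).2.2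

-- ===== PORT B =====
-- one loop iteration of B: rows ^= {i[0]}; cols ^= {i[1]}
def oddCells1AltStep (st : PySem.Set Int × PySem.Set Int) (i : List Int) :
    PySem.Set Int × PySem.Set Int :=
  (PySem.Set.symmDiff st.1 (PySem.Set.ofList [PySem.List.pyGetD i 0 0]),
   PySem.Set.symmDiff st.2 (PySem.Set.ofList [PySem.List.pyGetD i 1 0]))

def oddCells1_alt (n : Int) (m : Int) (indices : List (List Int)) : Int :=
  let st := indices.foldl oddCells1AltStep (PySem.Set.empty, PySem.Set.empty)
  let R := PySem.Set.len st.1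
  let C := PySem.Set.len st.2
  R * (m - C) + C * (n - R)

-- ===== PRECONDITION & SPEC =====
-- Pre_ excludes inputs where some inner list has fewer than 2 entries: there A (and B) raise IndexError.
def Pre_oddCells1 (_n : Int) (_m : Int) (indices : List (List Int)) : Prop :=
  ∀ i ∈ indices, 2 ≤ i.length
instance (n : Int) (m : Int) (indices : List (List Int)) : Decidable (Pre_oddCells1 n m indices) := by unfold Pre_oddCells1; infer_instance
def pvWitness_oddCells1 : Int × Int × List (List Int) := (2, 3, [[0, 1], [1, 1], [0, 1]])

def Spec_oddCells1 (n : Int) (m : Int) (indices : List (List Int)) (out : Int) : Prop := out = oddCells1_alt n m indices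
instance (n : Int) (m : Int) (indices : List (List Int)) (out : Int) : Decidable (Spec_oddCells1 n m indices out) := by unfold Spec_oddCells1; infer_instance

-- ===== CLAIM (what is proved, stated in full; the proofs are below) =====
def Claim_equal_oddCells1 : Prop := ∀ (n : Int) (m : Int) (indices : List (List Int)), Dom_oddCells1 n m indices → Pre_oddCells1 n m indices → Spec_oddCells1 n m indices (oddCells1 n m indices)

-- ===== LEMMAS AND PROOFS =====

-- the closed-form count for parity lists row, col
def pvF (n m : Int) (row col : List Int) : Int :=
  (row.length : Int) * (m - (col.length : Int)) + (col.length : Int) * (n - (row.length : Int))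

-- A's toggle of one coordinate, as a function
def pvToggle (s : List Int) (x : Int) : List Int :=
  if s.contains x then (PySem.List.remove? s x).getD s else s ++ [x]

lemma removeD_eq_erase (s : List Int) (x : Int) :
    (PySem.List.remove? s x).getD s = s.erase x := by
  rw [PySem.List.remove?, List.erase_eq_eraseIdx]
  cases List.idxOf? x s
  · simp
  · simp

-- A's branch on one coordinate equals B's symmetric-difference toggle (on a duplicate-free list)
lemma toggle_eq (s : List Int) (x : Int) (hs : s.Nodup) :
    pvToggle s x = PySem.Set.symmDiff s (PySem.Set.ofList [x]) := by
  unfold pvToggle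
  rw [removeD_eq_erase]
  show _ = PySem.Set.symmDiff s [x]
  unfold PySem.Set.symmDiff PySem.Set.diff PySem.Set.contains
  by_cases hx : x ∈ s
  · have hc : s.contains x = true := by simpa using hx
    rw [if_pos hc]
    have h3 : List.filter (fun y => !(List.contains s y)) [x] = [] := by
      simp [hx]
    rw [h3, List.append_nil, hs.erase_eq_filter]
    apply List.filter_congr
    intro a _
    simp [bne, beq_eq_decide]
  · have hc : s.contains x = false := by simpa using hx
    rw [if_neg (by simpa using hx)]
    have h2 : List.filter (fun y => !(List.contains [x] y)) s = s := by
      apply List.filter_eq_self.mpr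
      intro a ha
      simp only [List.contains_eq_mem, List.mem_singleton, Bool.not_eq_eq_eq_not, Bool.not_true,
        decide_eq_false_iff_not]
      rintro rfl; exact hx ha
    have h3 : List.filter (fun y => !(List.contains s y)) [x] = [x] := by
      simp [hx]
    rw [h2, h3]

lemma toggle_nodup (s : List Int) (x : Int) (hs : s.Nodup) : (pvToggle s x).Nodup := by
  unfold pvToggle
  by_cases hx : x ∈ s
  · have hc : s.contains x = true := by simpa using hx
    rw [if_pos hc, removeD_eq_erase]
    exact hs.erase x
  · have hc : s.contains x = false := by simpa using hx
    rw [if_neg (by simpa using hx)]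
    rw [List.nodup_append]
    refine ⟨hs, List.nodup_singleton x, ?_⟩
    intro a ha b hb
    rw [List.mem_singleton] at hb
    subst hb
    exact fun h => hx (h ▸ ha)

lemma toggle_len (s : List Int) (x : Int) :
    ((pvToggle s x).length : Int) =
      if s.contains x then (s.length : Int) - 1 else (s.length : Int) + 1 := by
  unfold pvToggle
  by_cases hx : x ∈ s
  · have hc : s.contains x = true := by simpa using hx
    rw [if_pos hc, if_pos hc, removeD_eq_erase, List.length_erase_of_mem hx]
    have : 1 ≤ s.length := List.length_pos_of_mem hx
    omega
  · have hc : s.contains x = false := by simpa using hx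
    rw [if_neg (by simpa using hx), if_neg (by simpa using hx)]
    simp

-- one step of A equals one step of B plus the closed-form total
lemma step_eq (n m : Int) (row col : List Int) (i : List Int)
    (hr : row.Nodup) (hc : col.Nodup) :
    oddCells1Step n m (row, col, pvF n m row col) i =
      ((oddCells1AltStep (row, col) i).1, (oddCells1AltStep (row, col) i).2,
        pvF n m (oddCells1AltStep (row, col) i).1 (oddCells1AltStep (row, col) i).2) := by
  have hrow : (oddCells1AltStep (row, col) i).1 = pvToggle row (PySem.List.pyGetD i 0 0) :=
    (toggle_eq row _ hr).symm
  have hcol : (oddCells1AltStep (row, col) i).2 = pvToggle col (PySem.List.pyGetD i 1 0) :=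
    (toggle_eq col _ hc).symm
  rw [hrow, hcol]
  simp only [oddCells1Step]
  by_cases h1 : row.contains (PySem.List.pyGetD i 0 0) = true <;>
    by_cases h2 : col.contains (PySem.List.pyGetD i 1 0) = true
  · have a1 : pvToggle row (PySem.List.pyGetD i 0 0)
        = (PySem.List.remove? row (PySem.List.pyGetD i 0 0)).getD row := by
      unfold pvToggle; rw [if_pos h1]
    have a2 : pvToggle col (PySem.List.pyGetD i 1 0)
        = (PySem.List.remove? col (PySem.List.pyGetD i 1 0)).getD col := by
      unfold pvToggle; rw [if_pos h2]
    have l1 := toggle_len row (PySem.List.pyGetD i 0 0)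
    rw [if_pos h1, a1] at l1
    have l2 := toggle_len col (PySem.List.pyGetD i 1 0)
    rw [if_pos h2, a2] at l2
    rw [if_pos h1, if_pos h2, a1, a2]
    simp only [pvF, Prod.mk.injEq]
    refine ⟨trivial, trivial, ?_⟩
    rw [l1, l2]; ring
  · have a1 : pvToggle row (PySem.List.pyGetD i 0 0)
        = (PySem.List.remove? row (PySem.List.pyGetD i 0 0)).getD row := by
      unfold pvToggle; rw [if_pos h1]
    have a2 : pvToggle col (PySem.List.pyGetD i 1 0)
        = col ++ [PySem.List.pyGetD i 1 0] := by
      unfold pvToggle; rw [if_neg h2]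
    have l1 := toggle_len row (PySem.List.pyGetD i 0 0)
    rw [if_pos h1, a1] at l1
    have l2 := toggle_len col (PySem.List.pyGetD i 1 0)
    rw [if_neg h2, a2] at l2
    rw [if_pos h1, if_neg h2, a1, a2]
    simp only [pvF, Prod.mk.injEq]
    refine ⟨trivial, trivial, ?_⟩
    rw [l1, l2]; ring
  · have a1 : pvToggle row (PySem.List.pyGetD i 0 0)
        = row ++ [PySem.List.pyGetD i 0 0] := by
      unfold pvToggle; rw [if_neg h1]
    have a2 : pvToggle col (PySem.List.pyGetD i 1 0)
        = (PySem.List.remove? col (PySem.List.pyGetD i 1 0)).getD col := by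
      unfold pvToggle; rw [if_pos h2]
    have l1 := toggle_len row (PySem.List.pyGetD i 0 0)
    rw [if_neg h1, a1] at l1
    have l2 := toggle_len col (PySem.List.pyGetD i 1 0)
    rw [if_pos h2, a2] at l2
    rw [if_neg h1, if_pos h2, a1, a2]
    simp only [pvF, Prod.mk.injEq]
    refine ⟨trivial, trivial, ?_⟩
    rw [l1, l2]; ring
  · have a1 : pvToggle row (PySem.List.pyGetD i 0 0)
        = row ++ [PySem.List.pyGetD i 0 0] := by
      unfold pvToggle; rw [if_neg h1]
    have a2 : pvToggle col (PySem.List.pyGetD i 1 0)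
        = col ++ [PySem.List.pyGetD i 1 0] := by
      unfold pvToggle; rw [if_neg h2]
    have l1 := toggle_len row (PySem.List.pyGetD i 0 0)
    rw [if_neg h1, a1] at l1
    have l2 := toggle_len col (PySem.List.pyGetD i 1 0)
    rw [if_neg h2, a2] at l2
    rw [if_neg h1, if_neg h2, a1, a2]
    simp only [pvF, Prod.mk.injEq]
    refine ⟨trivial, trivial, ?_⟩
    rw [l1, l2]; ring

lemma toggle_nodup' (s : List Int) (x : Int) (hs : s.Nodup) :
    (PySem.Set.symmDiff s (PySem.Set.ofList [x])).Nodup := by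
  rw [← toggle_eq s x hs]; exact toggle_nodup s x hs

-- main loop invariant: A's fold state is B's fold state plus the closed-form total
lemma loop_eq (n m : Int) (indices : List (List Int)) :
    ∀ (row col : List Int), row.Nodup → col.Nodup →
      indices.foldl (oddCells1Step n m) (row, col, pvF n m row col) =
        ((indices.foldl oddCells1AltStep (row, col)).1,
         (indices.foldl oddCells1AltStep (row, col)).2,
         pvF n m (indices.foldl oddCells1AltStep (row, col)).1
                 (indices.foldl oddCells1AltStep (row, col)).2) := by
  induction indices with
  | nil => intro row col _ _; rfl
  | cons i rest ih =>
    intro row col hr hc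
    have hstep := step_eq n m row col i hr hc
    simp only [List.foldl_cons, hstep]
    have hr' : (oddCells1AltStep (row, col) i).1.Nodup := by
      rw [oddCells1AltStep]; exact toggle_nodup' row _ hr
    have hc' : (oddCells1AltStep (row, col) i).2.Nodup := by
      rw [oddCells1AltStep]; exact toggle_nodup' col _ hc
    have := ih (oddCells1AltStep (row, col) i).1 (oddCells1AltStep (row, col) i).2 hr' hc'
    simpa using this

-- ===== VERDICT (by name: the statement is the Claim_ definition above) =====
theorem oddCells1_spec : Claim_equal_oddCells1 := by
  intro n m indices _ _
  unfold Spec_oddCells1 oddCells1 oddCells1_alt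
  have h0 : (0 : Int) = pvF n m [] [] := by simp [pvF]
  rw [h0, loop_eq n m indices [] [] List.nodup_nil List.nodup_nil]
  simp only [pvF, PySem.Set.len, PySem.Set.empty]
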